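-- pv_equiv track=rewrite | github.com/EhODavi/curso-python | exercicios-secao08/exercicio55.py | soma_principal_secundaria
-- ===== SOURCE A (Python) =====
-- from typing import List, Tuple
--
-- def soma_principal_secundaria(a: List[List[int]]) -> Tuple[int, int]:
--     soma_principal: int = 0
--     soma_secundaria: int = 0
--
--     for i in range(3):
--         for j in range(3):
--             if i == j:
--                 if i == 1:
--                     soma_secundaria += a[i][j]
--
--                 soma_principal += a[i][j]
--             elif i + j == 2:
--                 soma_secundaria += a[i][j]
--
--     return soma_principal, soma_secundaria
-- ===== SOURCE B (Python) =====
-- from typing import List, Tuple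
--
-- def soma_principal_secundaria(a: List[List[int]]) -> Tuple[int, int]:
--     soma_principal = a[0][0] + a[1][1] + a[2][2]
--     soma_secundaria = a[0][2] + a[1][1] + a[2][0]
--     return soma_principal, soma_secundaria
-- ===== Notes on version B (the rewrite author's own statement) =====
-- stated objective: simpler
-- what changed: Replaces the nested 3x3 loop with i==j / i+j==2 branch tests by direct closed-form indexing of the five diagonal cells.
import Mathlib
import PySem

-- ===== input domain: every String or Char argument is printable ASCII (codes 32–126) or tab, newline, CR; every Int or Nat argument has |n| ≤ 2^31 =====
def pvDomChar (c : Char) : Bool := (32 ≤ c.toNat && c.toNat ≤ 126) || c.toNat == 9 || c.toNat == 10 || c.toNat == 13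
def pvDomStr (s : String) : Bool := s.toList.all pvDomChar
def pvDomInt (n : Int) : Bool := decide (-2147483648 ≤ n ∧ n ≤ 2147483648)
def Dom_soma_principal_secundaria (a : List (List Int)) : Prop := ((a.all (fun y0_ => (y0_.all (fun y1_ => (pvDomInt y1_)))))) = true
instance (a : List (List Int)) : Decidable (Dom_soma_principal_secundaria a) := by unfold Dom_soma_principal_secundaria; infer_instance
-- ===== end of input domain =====

-- B replaces the nested 3x3 loop with branch tests by direct closed-form indexing of the
-- five diagonal cells (objective: simpler). Under Pre_ every access is in range, so the
-- `pyGetD … 0` reads below are exact transcriptions of the Python indexing a[i][j].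

-- ===== PORT A =====
-- a[i][j], exact under Pre_ (in range there)
def pvCell (a : List (List Int)) (i j : Int) : Int :=
  PySem.List.pyGetD (PySem.List.pyGetD a i []) j 0

-- literal transliteration of A's nested loop with its branch structure
def soma_principal_secundaria (a : List (List Int)) : Int × Int :=
  (PySem.List.pyRange 0 3 1).foldl (fun s i =>
    (PySem.List.pyRange 0 3 1).foldl (fun s j =>
      if i = j then
        let s := if i = 1 then (s.1, s.2 + pvCell a i j) else s
        (s.1 + pvCell a i j, s.2)
      else if i + j = 2 then
        (s.1, s.2 + pvCell a i j)
      else s) s) (0, 0)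

-- ===== PORT B =====
def soma_principal_secundaria_alt (a : List (List Int)) : Int × Int :=
  (pvCell a 0 0 + pvCell a 1 1 + pvCell a 2 2,
   pvCell a 0 2 + pvCell a 1 1 + pvCell a 2 0)

-- ===== PRECONDITION & SPEC =====
-- Pre_ = exactly the inputs where the Python A returns (it reads rows 0..2, columns 0,2 of
-- rows 0 and 2, column 1 of row 1; otherwise it raises IndexError).
def Pre_soma_principal_secundaria (a : List (List Int)) : Prop :=
  3 ≤ a.length ∧ 3 ≤ (a.getD 0 []).length ∧ 2 ≤ (a.getD 1 []).length ∧ 3 ≤ (a.getD 2 []).length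
instance (a : List (List Int)) : Decidable (Pre_soma_principal_secundaria a) := by
  unfold Pre_soma_principal_secundaria; infer_instance

def pvWitness_soma_principal_secundaria : List (List Int) := [[1,2,3],[4,5,6],[7,8,9]]

def Spec_soma_principal_secundaria (a : List (List Int)) (out : Int × Int) : Prop := out = soma_principal_secundaria_alt a
instance (a : List (List Int)) (out : Int × Int) : Decidable (Spec_soma_principal_secundaria a out) := by unfold Spec_soma_principal_secundaria; infer_instance

-- ===== CLAIM (what is proved, stated in full; the proofs are below) =====
def Claim_equal_soma_principal_secundaria : Prop := ∀ (a : List (List Int)), Dom_soma_principal_secundaria a → Pre_soma_principal_secundaria a → Spec_soma_principal_secundaria a (soma_principal_secundaria a)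

-- ===== LEMMAS AND PROOFS =====

-- ===== VERDICT (by name: the statement is the Claim_ definition above) =====
theorem soma_principal_secundaria_spec : Claim_equal_soma_principal_secundaria := by
  intro a _ _
  unfold Spec_soma_principal_secundaria soma_principal_secundaria soma_principal_secundaria_alt
  simp [PySem.List.pyRange, List.range_succ]
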